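-- pv_equiv track=rewrite | github.com/kacperwleklak/ZTI-CTA | runner.py | get_objects_common_categories
-- ===== SOURCE A (Python) =====
-- def get_objects_common_categories(object_categories):
--     flat_categories = []
--     for row in object_categories:
--         row_all_categories = []
--         for category_level in row:
--             row_all_categories = row_all_categories + category_level
--         flat_categories.append(set(row_all_categories))
--     common_categories = recurrent_sets_intersection(flat_categories)
--     return common_categories
--
-- def recurrent_sets_intersection(sets_list):
--     current_set = sets_list[0]
--     if len(sets_list) == 1:
--         return current_set
--     return current_set.intersection(recurrent_sets_intersection(sets_list[1:]))
-- ===== SOURCE B (Python) =====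
-- def get_objects_common_categories(object_categories):
--     flat = [set(cat for level in row for cat in level) for row in object_categories]
--     result = flat[0]
--     for s in flat[1:]:
--         result &= s
--     return result
-- ===== Notes on version B (the rewrite author's own statement) =====
-- stated objective: simpler
-- what changed: Flattening via a single comprehension instead of repeated list concatenation, and the recursive tail-slicing set-intersection helper replaced by an iterative left fold with &=.
-- outside the precondition, e.g. on get_objects_common_categories([]): A raises IndexError, B raises IndexError
import Mathlib
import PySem

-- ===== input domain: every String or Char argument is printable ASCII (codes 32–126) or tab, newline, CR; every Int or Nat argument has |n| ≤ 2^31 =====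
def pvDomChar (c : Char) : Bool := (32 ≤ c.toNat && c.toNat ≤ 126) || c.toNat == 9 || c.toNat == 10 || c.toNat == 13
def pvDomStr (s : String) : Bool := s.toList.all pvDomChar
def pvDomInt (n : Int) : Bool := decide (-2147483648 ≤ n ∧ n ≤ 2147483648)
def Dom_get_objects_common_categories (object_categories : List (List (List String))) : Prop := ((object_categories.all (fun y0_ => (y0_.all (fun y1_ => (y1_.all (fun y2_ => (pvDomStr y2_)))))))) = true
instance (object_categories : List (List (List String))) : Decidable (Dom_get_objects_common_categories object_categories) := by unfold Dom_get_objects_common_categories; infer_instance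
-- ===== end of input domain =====

-- B: flatten each row with one comprehension (instead of quadratic repeated list
-- concatenation) and intersect the per-row sets by an iterative left fold with &=
-- (instead of recursion over tail slices); objective: simpler.

-- ===== PORT A =====
-- recurrent_sets_intersection; sets_list[0] raises IndexError on [] (excluded by Pre_),
-- the [] branch here is unreachable under Pre_.
def pvRecInter (sets_list : List (PySem.Set String)) : PySem.Set String :=
  match sets_list with
  | [] => []
  | [s] => s
  | s :: rest => PySem.Set.inter s (pvRecInter rest)

def get_objects_common_categories (object_categories : List (List (List String))) : List String :=
  let flat_categories := object_categories.foldl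
    (fun acc row =>
      acc ++ [PySem.Set.ofList (row.foldl (fun r lvl => r ++ lvl) [])]) []
  pvRecInter flat_categories

-- ===== PORT B =====
-- flat[0] raises IndexError on [] in Python (excluded by Pre_): [] branch unreachable.
def get_objects_common_categories_alt (object_categories : List (List (List String))) : List String :=
  let flat := object_categories.map (fun row => PySem.Set.ofList (row.flatMap (fun lvl => lvl)))
  match flat with
  | [] => []
  | s :: rest => rest.foldl PySem.Set.inter s

-- ===== PRECONDITION & SPEC =====
-- Pre_ excludes only the empty list, on which both Pythons raise IndexError.
def Pre_get_objects_common_categories (object_categories : List (List (List String))) : Prop :=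
  object_categories ≠ []
instance (object_categories : List (List (List String))) : Decidable (Pre_get_objects_common_categories object_categories) := by
  unfold Pre_get_objects_common_categories; infer_instance
def pvWitness_get_objects_common_categories : List (List (List String)) := [[["a", "b"], ["c"]], [["b", "c"]]]

def Spec_get_objects_common_categories (object_categories : List (List (List String))) (out : List String) : Prop := out = get_objects_common_categories_alt object_categories
instance (object_categories : List (List (List String))) (out : List String) : Decidable (Spec_get_objects_common_categories object_categories out) := by unfold Spec_get_objects_common_categories; infer_instance

-- ===== CLAIM (what is proved, stated in full; the proofs are below) =====
def Claim_equal_get_objects_common_categories : Prop := ∀ (object_categories : List (List (List String))), Dom_get_objects_common_categories object_categories → Pre_get_objects_common_categories object_categories → Spec_get_objects_common_categories object_categories (get_objects_common_categories object_categories)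

-- ===== LEMMAS AND PROOFS =====

theorem pv_foldl_append (row : List (List String)) (r : List String) :
    row.foldl (fun r lvl => r ++ lvl) r = r ++ row.flatMap (fun lvl => lvl) := by
  induction row generalizing r with
  | nil => simp
  | cons a t ih => simp [List.foldl_cons, ih, List.flatMap_cons]

theorem pv_foldl_snoc {α β : Type} (l : List α) (f : α → β) (acc : List β) :
    l.foldl (fun acc x => acc ++ [f x]) acc = acc ++ l.map f := by
  induction l generalizing acc with
  | nil => simp
  | cons a t ih => simp [List.foldl_cons, ih]

theorem pv_inter_assoc (a b c : PySem.Set String) :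
    PySem.Set.inter a (PySem.Set.inter b c) = PySem.Set.inter (PySem.Set.inter a b) c := by
  simp only [PySem.Set.inter, List.filter_filter]
  refine List.filter_congr (fun x _ => ?_)
  simp [List.mem_filter, Bool.and_comm]

theorem pv_foldl_inter (t : List (PySem.Set String)) (a b : PySem.Set String) :
    t.foldl PySem.Set.inter (PySem.Set.inter a b) = PySem.Set.inter a (t.foldl PySem.Set.inter b) := by
  induction t generalizing b with
  | nil => rfl
  | cons c u ih => simp only [List.foldl_cons, ← pv_inter_assoc, ih]

theorem pv_recInter_eq_foldl (s : PySem.Set String) (rest : List (PySem.Set String)) :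
    pvRecInter (s :: rest) = rest.foldl PySem.Set.inter s := by
  induction rest generalizing s with
  | nil => rfl
  | cons b t ih =>
    show PySem.Set.inter s (pvRecInter (b :: t)) = _
    rw [ih b, List.foldl_cons, pv_foldl_inter]

-- ===== VERDICT (by name: the statement is the Claim_ definition above) =====
theorem get_objects_common_categories_spec : Claim_equal_get_objects_common_categories := by
  intro ocs _ hpre
  unfold Spec_get_objects_common_categories
  unfold get_objects_common_categories get_objects_common_categories_alt
  simp only [pv_foldl_append, List.nil_append, pv_foldl_snoc, List.nil_append]
  cases ocs with
  | nil => exact absurd rfl hpre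
  | cons r t => simp [pv_recInter_eq_foldl]
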